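-- pv_equiv track=rewrite | github.com/prasetya12/shared-ui | script/utils.py | estimate_max_tokens
-- ===== SOURCE A (Python) =====
-- MAX_TOKENS_BY_CHUNK = {
--     4: 4000,
--     8: 8000,
--     16: 16000
-- }
--
-- def estimate_max_tokens(chunk_number: int) -> int:
--     """
--     Estimates the max token limit based on a given chunk number.
--
--     The function uses a predefined dictionary to determine the token limit.
--     The logic is as follows:
--     - If the chunk number is less than or equal to a key in the dictionary, it returns the value of the smallest key that meets this condition.
--     - For example, a chunk_number of 3 will return the value for chunk_number 4.
--     - If the chunk number is greater than the largest key in the dictionary (e.g., 17), it will return the value of the largest key (16000).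
--
--     Args:
--         chunk_number: The number of chunks to estimate the token limit for.
--
--     Returns:
--         An integer representing the estimated maximum token limit.
--     """
--     if not isinstance(chunk_number, int) or chunk_number <= 0:
--         raise ValueError("Chunk number must be a positive integer.")
--
--     # Get the keys from the dictionary and sort them in ascending order
--     sorted_keys = sorted(MAX_TOKENS_BY_CHUNK.keys())
--
--     # Find the first key that is greater than or equal to the chunk number.
--     for key in sorted_keys:
--         if chunk_number <= key:
--             return MAX_TOKENS_BY_CHUNK[key]
--
--     # If the chunk number is greater than all keys, return the max value.
--     return MAX_TOKENS_BY_CHUNK[sorted_keys[-1]]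
-- ===== SOURCE B (Python) =====
-- import bisect
--
-- MAX_TOKENS_BY_CHUNK = {
--     4: 4000,
--     8: 8000,
--     16: 16000
-- }
--
-- _THRESHOLDS = sorted(MAX_TOKENS_BY_CHUNK)
-- _VALUES = [MAX_TOKENS_BY_CHUNK[k] for k in _THRESHOLDS]
--
-- def estimate_max_tokens(chunk_number: int) -> int:
--     if not isinstance(chunk_number, int) or chunk_number <= 0:
--         raise ValueError("Chunk number must be a positive integer.")
--     idx = bisect.bisect_left(_THRESHOLDS, chunk_number)
--     return _VALUES[idx] if idx < len(_VALUES) else _VALUES[-1]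
-- ===== Notes on version B (the rewrite author's own statement) =====
-- stated objective: idiomatic
-- what changed: Replaces the sorted-keys linear scan over the dict with a precomputed threshold/value table queried by bisect.bisect_left (binary search) with a clamp for chunk numbers above the largest key.
-- outside the precondition, e.g. on estimate_max_tokens(0): A raises ValueError, B raises ValueError
import Mathlib
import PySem

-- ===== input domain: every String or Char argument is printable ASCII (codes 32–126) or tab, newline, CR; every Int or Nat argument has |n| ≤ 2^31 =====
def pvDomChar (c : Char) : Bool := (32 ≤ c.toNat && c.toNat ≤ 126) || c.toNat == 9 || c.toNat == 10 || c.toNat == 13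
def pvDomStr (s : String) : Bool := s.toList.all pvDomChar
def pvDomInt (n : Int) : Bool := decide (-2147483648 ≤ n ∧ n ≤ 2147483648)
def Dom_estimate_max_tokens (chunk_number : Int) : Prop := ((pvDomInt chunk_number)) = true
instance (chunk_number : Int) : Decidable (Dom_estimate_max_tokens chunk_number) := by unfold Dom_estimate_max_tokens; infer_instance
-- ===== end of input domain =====

-- B replaces A's linear scan of the sorted dict keys with a precomputed threshold/value
-- table queried by binary search (bisect_left) plus a clamp — idiomatic, same results.


-- ===== PORT A =====
def MAX_TOKENS_BY_CHUNK : PySem.Dict Int Int :=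
  PySem.Dict.ofList [(4, 4000), (8, 8000), (16, 16000)]

-- the 'for key in sorted_keys: if chunk_number <= key: return dict[key]' loop
def emtLoopA (chunk_number : Int) : List Int → Option Int
  | [] => none
  | k :: ks =>
    if chunk_number ≤ k then MAX_TOKENS_BY_CHUNK.get? k else emtLoopA chunk_number ks

def estimate_max_tokens (chunk_number : Int) : Int :=
  let sorted_keys := PySem.List.sorted (MAX_TOKENS_BY_CHUNK.keys) (fun k => k)
  match emtLoopA chunk_number sorted_keys with
  | some v => v
  | none => (MAX_TOKENS_BY_CHUNK.get? (sorted_keys.getLastD 0)).getD 0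

-- ===== PORT B =====
def emtThresholds : List Int := [4, 8, 16]
def emtValues : List Int := [4000, 8000, 16000]

def estimate_max_tokens_alt (chunk_number : Int) : Int :=
  let idx := PySem.List.bisectLeft emtThresholds chunk_number
  if idx < emtValues.length then emtValues.getD idx 0
  else emtValues.getLastD 0

-- ===== PRECONDITION & SPEC =====
-- A raises ValueError on chunk_number <= 0; Pre_ excludes exactly those inputs.
def Pre_estimate_max_tokens (chunk_number : Int) : Prop := 0 < chunk_number
instance (chunk_number : Int) : Decidable (Pre_estimate_max_tokens chunk_number) := by unfold Pre_estimate_max_tokens; infer_instance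
def pvWitness_estimate_max_tokens : Int := 3

def Spec_estimate_max_tokens (chunk_number : Int) (out : Int) : Prop := out = estimate_max_tokens_alt chunk_number
instance (chunk_number : Int) (out : Int) : Decidable (Spec_estimate_max_tokens chunk_number out) := by unfold Spec_estimate_max_tokens; infer_instance

-- ===== CLAIM (what is proved, stated in full; the proofs are below) =====
def Claim_equal_estimate_max_tokens : Prop := ∀ (chunk_number : Int), Dom_estimate_max_tokens chunk_number → Pre_estimate_max_tokens chunk_number → Spec_estimate_max_tokens chunk_number (estimate_max_tokens chunk_number)

-- ===== LEMMAS AND PROOFS =====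
lemma emt_sorted_keys : PySem.List.sorted (MAX_TOKENS_BY_CHUNK.keys) (fun k => k) = [4, 8, 16] := by decide

lemma emtA_le4 (c : Int) (h : c ≤ 4) : estimate_max_tokens c = 4000 := by
  unfold estimate_max_tokens
  rw [emt_sorted_keys]
  simp [emtLoopA, h, show MAX_TOKENS_BY_CHUNK.get? 4 = some 4000 from by decide]

lemma emtA_le8 (c : Int) (h4 : ¬ c ≤ 4) (h : c ≤ 8) : estimate_max_tokens c = 8000 := by
  unfold estimate_max_tokens
  rw [emt_sorted_keys]
  simp [emtLoopA, h4, h, show MAX_TOKENS_BY_CHUNK.get? 8 = some 8000 from by decide]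

lemma emtA_le16 (c : Int) (h4 : ¬ c ≤ 4) (h8 : ¬ c ≤ 8) (h : c ≤ 16) :
    estimate_max_tokens c = 16000 := by
  unfold estimate_max_tokens
  rw [emt_sorted_keys]
  simp [emtLoopA, h4, h8, h, show MAX_TOKENS_BY_CHUNK.get? 16 = some 16000 from by decide]

lemma emtA_gt16 (c : Int) (h4 : ¬ c ≤ 4) (h8 : ¬ c ≤ 8) (h16 : ¬ c ≤ 16) :
    estimate_max_tokens c = 16000 := by
  unfold estimate_max_tokens
  rw [emt_sorted_keys]
  simp [emtLoopA, h4, h8, h16, show MAX_TOKENS_BY_CHUNK.get? 16 = some 16000 from by decide]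

lemma emtB_le4 (c : Int) (h : c ≤ 4) : estimate_max_tokens_alt c = 4000 := by
  have h4 : ¬ (4:Int) < c := by omega
  have h8 : ¬ (8:Int) < c := by omega
  simp [estimate_max_tokens_alt, emtThresholds, emtValues, PySem.List.bisectLeft,
    PySem.List.bisectLeftLoop, h4, h8]

lemma emtB_le8 (c : Int) (h4 : ¬ c ≤ 4) (h : c ≤ 8) : estimate_max_tokens_alt c = 8000 := by
  have h4' : (4:Int) < c := by omega
  have h8 : ¬ (8:Int) < c := by omega
  simp [estimate_max_tokens_alt, emtThresholds, emtValues, PySem.List.bisectLeft,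
    PySem.List.bisectLeftLoop, h4', h8]

lemma emtB_le16 (c : Int) (h8 : ¬ c ≤ 8) (h : c ≤ 16) : estimate_max_tokens_alt c = 16000 := by
  have h8' : (8:Int) < c := by omega
  have h16 : ¬ (16:Int) < c := by omega
  simp [estimate_max_tokens_alt, emtThresholds, emtValues, PySem.List.bisectLeft,
    PySem.List.bisectLeftLoop, h8', h16]

lemma emtB_gt16 (c : Int) (h16 : ¬ c ≤ 16) : estimate_max_tokens_alt c = 16000 := by
  have h8' : (8:Int) < c := by omega
  have h16' : (16:Int) < c := by omega
  simp [estimate_max_tokens_alt, emtThresholds, emtValues, PySem.List.bisectLeft,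
    PySem.List.bisectLeftLoop, h8', h16']

-- ===== VERDICT (by name: the statement is the Claim_ definition above) =====
theorem estimate_max_tokens_spec : Claim_equal_estimate_max_tokens := by
  intro c _ _
  unfold Spec_estimate_max_tokens
  by_cases h4 : c ≤ 4
  · rw [emtA_le4 c h4, emtB_le4 c h4]
  · by_cases h8 : c ≤ 8
    · rw [emtA_le8 c h4 h8, emtB_le8 c h4 h8]
    · by_cases h16 : c ≤ 16
      · rw [emtA_le16 c h4 h8 h16, emtB_le16 c h8 h16]
      · rw [emtA_gt16 c h4 h8 h16, emtB_gt16 c h16]
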